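-- pv_equiv track=rewrite | github.com/umarqadri345/awesome-lark-bots | newsbot/bot.py | _build_card_elements
-- ===== SOURCE A (Python) =====
-- MAX_CARD_SECTION_LEN = 3500
--
-- def _build_card_elements(markdown_body: str) -> list[dict]:
--     """把长 Markdown 拆分成多个 card element（每段不超过限长）。"""
--     sections = markdown_body.split("\n---\n")
--     elements: list[dict] = []
--     for section in sections:
--         section = section.strip()
--         if not section:
--             continue
--         if len(section) <= MAX_CARD_SECTION_LEN:
--             elements.append({"tag": "markdown", "content": section})
--             elements.append({"tag": "hr"})
--         else:
--             chunks = _split_markdown(section, MAX_CARD_SECTION_LEN)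
--             for chunk in chunks:
--                 elements.append({"tag": "markdown", "content": chunk})
--             elements.append({"tag": "hr"})
--     if elements and elements[-1].get("tag") == "hr":
--         elements.pop()
--     if not elements:
--         elements = [{"tag": "markdown", "content": markdown_body[:MAX_CARD_SECTION_LEN]}]
--     return elements
--
-- def _split_markdown(text: str, max_len: int) -> list[str]:
--     """按段落边界拆分长文本。"""
--     lines = text.split("\n")
--     chunks: list[str] = []
--     current: list[str] = []
--     current_len = 0
--     for line in lines:
--         if current_len + len(line) + 1 > max_len and current:
--             chunks.append("\n".join(current))
--             current = []
--             current_len = 0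
--         current.append(line)
--         current_len += len(line) + 1
--     if current:
--         chunks.append("\n".join(current))
--     return chunks
-- ===== SOURCE B (Python) =====
-- MAX_CARD_SECTION_LEN = 3500
--
--
-- def _chunks(text: str) -> list[str]:
--     """Chunk list of a section: itself if short, else split at greedy
--     paragraph boundaries computed from a prefix-sum table of line costs."""
--     if len(text) <= MAX_CARD_SECTION_LEN:
--         return [text]
--     lines = text.split("\n")
--     n = len(lines)
--     pre = [0]
--     for ln in lines:
--         pre.append(pre[-1] + len(ln) + 1)
--     chunks = []
--     i = 0
--     while i < n:
--         j = i + 1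
--         while j < n and pre[j + 1] - pre[i] <= MAX_CARD_SECTION_LEN:
--             j += 1
--         chunks.append("\n".join(lines[i:j]))
--         i = j
--     return chunks
--
--
-- def _render_sections(sections: list[str]) -> list[dict]:
--     """Recursively render sections, an hr only between two rendered groups."""
--     if not sections:
--         return []
--     head = sections[0].strip()
--     tail = _render_sections(sections[1:])
--     if not head:
--         return tail
--     group = [{"tag": "markdown", "content": c} for c in _chunks(head)]
--     return group + ([{"tag": "hr"}] + tail if tail else tail)
--
--
-- def _build_card_elements(markdown_body: str) -> list[dict]:
--     elements = _render_sections(markdown_body.split("\n---\n"))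
--     if not elements:
--         return [{"tag": "markdown", "content": markdown_body[:MAX_CARD_SECTION_LEN]}]
--     return elements
-- ===== Notes on version B (the rewrite author's own statement) =====
-- stated objective: alternative
-- what changed: B renders sections by structural recursion with an hr inserted only between two rendered groups (no append-then-pop mutation), and replaces the accumulator-based line chunker by a prefix-sum table of line costs with an index scan that finds each chunk boundary and slices the line list.
import Mathlib
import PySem

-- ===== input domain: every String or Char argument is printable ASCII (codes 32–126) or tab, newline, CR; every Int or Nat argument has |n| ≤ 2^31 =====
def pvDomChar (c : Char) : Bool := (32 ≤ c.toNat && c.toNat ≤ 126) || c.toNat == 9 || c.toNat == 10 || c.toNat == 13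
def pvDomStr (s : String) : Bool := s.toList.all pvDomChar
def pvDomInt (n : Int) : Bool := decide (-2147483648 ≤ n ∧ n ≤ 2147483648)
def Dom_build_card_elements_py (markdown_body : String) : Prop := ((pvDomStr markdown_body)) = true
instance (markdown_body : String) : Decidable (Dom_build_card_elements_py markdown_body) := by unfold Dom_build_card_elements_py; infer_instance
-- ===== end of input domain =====

-- B renders the sections by structural recursion (an hr only between two rendered groups,
-- no append-then-pop) and chunks an oversized section from a prefix-sum table of line
-- costs with an index scan per chunk boundary (objective: alternative algorithm, same cost).

-- dict literals shared by both ports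
def pvMd (c : String) : List (String × String) := [("tag", "markdown"), ("content", c)]
def pvHr : List (String × String) := [("tag", "hr")]

-- ===== PORT A =====
def pvSplitMarkdown (text : String) (maxLen : Int) : List String :=
  let lines := (PySem.Str.split? text "\n").getD []
  let st := lines.foldl
    (fun (st : List String × List String × Int) line =>
      if st.2.2 + PySem.Str.len line + 1 > maxLen ∧ st.2.1 ≠ [] then
        (st.1 ++ [PySem.Str.join "\n" st.2.1], [line], PySem.Str.len line + 1)
      else
        (st.1, st.2.1 ++ [line], st.2.2 + PySem.Str.len line + 1))
    ([], [], 0)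
  if st.2.1 ≠ [] then st.1 ++ [PySem.Str.join "\n" st.2.1] else st.1

def build_card_elements_py (markdown_body : String) : List (List (String × String)) :=
  let sections := (PySem.Str.split? markdown_body "\n---\n").getD []
  let elements := sections.foldl
    (fun elems sec =>
      if PySem.Str.strip sec = "" then elems
      else if PySem.Str.len (PySem.Str.strip sec) ≤ 3500 then
        (elems ++ [pvMd (PySem.Str.strip sec)]) ++ [pvHr]
      else
        (elems ++ (pvSplitMarkdown (PySem.Str.strip sec) 3500).map pvMd) ++ [pvHr])
    []
  let elements :=
    match elements.getLast? with
    | some e => if PySem.Dict.get? (PySem.Dict.mk e) "tag" = some "hr" then elements.dropLast else elements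
    | none => elements
  if elements = [] then [pvMd (PySem.Str.slice markdown_body none (some 3500))] else elements

-- ===== PORT B =====
-- inner while loop of _chunks: advance j while the next line still fits;
-- python indexes pre[i], pre[j+1] which are always in range (j < n, |pre| = n+1), so getD 0 is exact
def pvChunksInner (pre : List Int) (n i j : Nat) : Nat :=
  if h : j < n ∧ pre.getD (j + 1) 0 - pre.getD i 0 ≤ 3500 then pvChunksInner pre n i (j + 1) else j
termination_by n - j
decreasing_by omega

-- the outer while loop needs i < j for termination
lemma pvChunksInner_ge (pre : List Int) (n i j : Nat) : j ≤ pvChunksInner pre n i j := by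
  rw [pvChunksInner]
  split
  · exact le_trans (by omega) (pvChunksInner_ge pre n i (j + 1))
  · exact le_refl j
termination_by n - j
decreasing_by omega

-- outer while loop of _chunks
def pvChunksOuter (lines : List String) (pre : List Int) (n i : Nat) : List String :=
  if h : i < n then
    PySem.Str.join "\n" (PySem.List.slice lines (some (i : Int)) (some ((pvChunksInner pre n i (i + 1) : Int))))
      :: pvChunksOuter lines pre n (pvChunksInner pre n i (i + 1))
  else []
termination_by n - i
decreasing_by have := pvChunksInner_ge pre n i (i + 1); omega

def pvChunks (text : String) : List String :=
  if PySem.Str.len text ≤ 3500 then [text]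
  else
    let lines := (PySem.Str.split? text "\n").getD []
    -- pre[-1] is always defined (the list starts as [0]), so getLast?.getD 0 is exact
    let pre := lines.foldl (fun acc ln => acc ++ [acc.getLast?.getD 0 + PySem.Str.len ln + 1]) ([0] : List Int)
    pvChunksOuter lines pre lines.length 0

def pvRenderSections : List String → List (List (String × String))
  | [] => []
  | sec :: rest =>
    let head := PySem.Str.strip sec
    let tail := pvRenderSections rest
    if head = "" then tail
    else (pvChunks head).map pvMd ++ (if tail ≠ [] then pvHr :: tail else tail)

def build_card_elements_py_alt (markdown_body : String) : List (List (String × String)) :=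
  let elements := pvRenderSections ((PySem.Str.split? markdown_body "\n---\n").getD [])
  if elements = [] then [pvMd (PySem.Str.slice markdown_body none (some 3500))] else elements

-- ===== PRECONDITION & SPEC =====
def Spec_build_card_elements_py (markdown_body : String) (out : List (List (String × String))) : Prop := out = build_card_elements_py_alt markdown_body
instance (markdown_body : String) (out : List (List (String × String))) : Decidable (Spec_build_card_elements_py markdown_body out) := by unfold Spec_build_card_elements_py; infer_instance

-- ===== CLAIM (what is proved, stated in full; the proofs are below) =====
def Claim_equal_build_card_elements_py : Prop := ∀ (markdown_body : String), Dom_build_card_elements_py markdown_body → Spec_build_card_elements_py markdown_body (build_card_elements_py markdown_body)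

-- ===== LEMMAS AND PROOFS =====

-- Common reference chunking: greedily take lines while they fit.
def pvCost (l : String) : Int := PySem.Str.len l + 1

def takeG : Int → List String → List String × List String
  | _, [] => ([], [])
  | acc, x :: xs =>
    if acc + pvCost x ≤ 3500 then
      let p := takeG (acc + pvCost x) xs
      (x :: p.1, p.2)
    else ([], x :: xs)

lemma takeG_snd_len (acc : Int) (xs : List String) : (takeG acc xs).2.length ≤ xs.length := by
  induction xs generalizing acc with
  | nil => simp [takeG]
  | cons x t ih =>
    rw [takeG]
    split
    · exact le_trans (ih _) (by simp)
    · simp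

def gSpec : List String → List String
  | [] => []
  | x :: xs =>
    PySem.Str.join "\n" (x :: (takeG (pvCost x) xs).1) :: gSpec (takeG (pvCost x) xs).2
termination_by l => l.length
decreasing_by have := takeG_snd_len (pvCost x) xs; simp; omega

-- ---- A's greedy accumulator fold equals gSpec ----
def pvStepA (st : List String × List String × Int) (line : String) : List String × List String × Int :=
  if st.2.2 + PySem.Str.len line + 1 > (3500 : Int) ∧ st.2.1 ≠ [] then
    (st.1 ++ [PySem.Str.join "\n" st.2.1], [line], PySem.Str.len line + 1)
  else
    (st.1, st.2.1 ++ [line], st.2.2 + PySem.Str.len line + 1)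

lemma stepA_shift (ls : List String) : ∀ (ch cur : List String) (k : Int),
    ls.foldl pvStepA (ch, cur, k)
      = (ch ++ (ls.foldl pvStepA ([], cur, k)).1, (ls.foldl pvStepA ([], cur, k)).2) := by
  induction ls with
  | nil => intro ch cur k; simp
  | cons x t ih =>
    intro ch cur k
    simp only [List.foldl_cons, pvStepA]
    by_cases hc : k + PySem.Str.len x + 1 > (3500 : Int) ∧ cur ≠ []
    · rw [if_pos hc, if_pos hc,
        ih (ch ++ [PySem.Str.join "\n" cur]) [x] (PySem.Str.len x + 1)]
      simp only [List.nil_append]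
      rw [ih [PySem.Str.join "\n" cur] [x] (PySem.Str.len x + 1)]
      simp
    · rw [if_neg hc, if_neg hc]
      exact ih ch (cur ++ [x]) (k + PySem.Str.len x + 1)

lemma greedy_eq (ls : List String) : ∀ (cur : List String) (k : Int), cur ≠ [] →
    (if (ls.foldl pvStepA ([], cur, k)).2.1 ≠ [] then
       (ls.foldl pvStepA ([], cur, k)).1 ++ [PySem.Str.join "\n" (ls.foldl pvStepA ([], cur, k)).2.1]
     else (ls.foldl pvStepA ([], cur, k)).1)
    = PySem.Str.join "\n" (cur ++ (takeG k ls).1) :: gSpec (takeG k ls).2 := by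
  induction ls with
  | nil =>
    intro cur k hcur
    simp [takeG, gSpec, hcur]
  | cons x t ih =>
    intro cur k hcur
    simp only [List.foldl_cons, pvStepA]
    by_cases hc : k + pvCost x ≤ 3500
    · have hc' : ¬ (k + PySem.Str.len x + 1 > (3500 : Int) ∧ cur ≠ []) := by
        unfold pvCost at hc; intro h; exact absurd h.1 (by omega)
      rw [if_neg hc']
      rw [takeG, if_pos hc]
      have hk : k + PySem.Str.len x + 1 = k + pvCost x := by unfold pvCost; ring
      rw [hk, ih (cur ++ [x]) (k + pvCost x) (by simp)]
      simp
    · have hcpos : k + PySem.Str.len x + 1 > (3500 : Int) ∧ cur ≠ [] := by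
        constructor
        · unfold pvCost at hc; omega
        · exact hcur
      rw [if_pos hcpos]
      rw [takeG, if_neg hc]
      simp only [List.nil_append]
      rw [stepA_shift t [PySem.Str.join "\n" cur] [x] (PySem.Str.len x + 1)]
      have hx : PySem.Str.len x + 1 = pvCost x := by unfold pvCost; ring
      rw [hx, gSpec]
      by_cases h2 : (List.foldl pvStepA ([], [x], pvCost x) t).2.1 ≠ []
      · rw [if_pos h2]
        have := ih [x] (pvCost x) (by simp)
        rw [if_pos h2] at this
        simp only [List.singleton_append]
        rw [List.cons_append, this]
        simp
      · rw [if_neg h2]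
        have := ih [x] (pvCost x) (by simp)
        rw [if_neg h2] at this
        rw [this]
        simp

lemma pv_go_ne (sep : List Char) : ∀ (fuel : Nat) (l cur : List Char) (acc : List (List Char)),
    PySem.Chars.splitOn.go sep fuel l cur acc ≠ [] := by
  intro fuel
  induction fuel with
  | zero => intro l cur acc; simp [PySem.Chars.splitOn.go]
  | succ n ih =>
    intro l cur acc
    cases l with
    | nil => simp [PySem.Chars.splitOn.go]
    | cons c rest =>
      simp only [PySem.Chars.splitOn.go]
      split_ifs <;> apply ih

lemma pv_split_getD_ne_nil (s sep : String) (h : sep.toList.isEmpty = false) :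
    (PySem.Str.split? s sep).getD [] ≠ [] := by
  unfold PySem.Str.split? PySem.Chars.split?
  rw [h]
  simp only [Bool.false_eq_true, if_false, Option.map_some, Option.getD_some, ne_eq,
    List.map_eq_nil_iff]
  unfold PySem.Chars.splitOn
  exact pv_go_ne _ _ _ _ _

lemma splitMarkdown_eq (text : String) :
    pvSplitMarkdown text 3500 = gSpec ((PySem.Str.split? text "\n").getD []) := by
  unfold pvSplitMarkdown
  have hne := pv_split_getD_ne_nil text "\n" (by decide)
  have hfun : (fun (st : List String × List String × Int) line =>
      if st.2.2 + PySem.Str.len line + 1 > (3500 : Int) ∧ st.2.1 ≠ [] then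
        (st.1 ++ [PySem.Str.join "\n" st.2.1], [line], PySem.Str.len line + 1)
      else
        (st.1, st.2.1 ++ [line], st.2.2 + PySem.Str.len line + 1)) = pvStepA := rfl
  rw [hfun]
  cases hl : (PySem.Str.split? text "\n").getD [] with
  | nil => exact absurd hl hne
  | cons x xs =>
    simp only [List.foldl_cons]
    have hstep : pvStepA ([], [], 0) x = ([], [x], PySem.Str.len x + 1) := by
      unfold pvStepA
      rw [if_neg (by simp)]
      simp
    rw [hstep]
    have hthis := greedy_eq xs [x] (PySem.Str.len x + 1) (by simp)
    have hx : PySem.Str.len x + 1 = pvCost x := rfl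
    rw [hx] at hthis
    rw [hx, hthis, gSpec]
    simp

-- ---- B's prefix-sum chunker equals gSpec ----
def pvPreFold (lines : List String) : List Int :=
  lines.foldl (fun acc ln => acc ++ [acc.getLast?.getD 0 + PySem.Str.len ln + 1]) ([0] : List Int)

def prS (lines : List String) (k : Nat) : Int := ((lines.take k).map pvCost).sum

lemma foldl_pre (ls : List String) : ∀ (pref : List Int) (v : Int), pref.getLast? = some v →
    ls.foldl (fun acc ln => acc ++ [acc.getLast?.getD 0 + PySem.Str.len ln + 1]) pref
      = pref ++ (List.range ls.length).map (fun k => v + prS ls (k + 1)) := by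
  induction ls with
  | nil => intro pref v h; simp
  | cons x t ih =>
    intro pref v h
    simp only [List.foldl_cons, h, Option.getD_some]
    rw [ih (pref ++ [v + PySem.Str.len x + 1]) (v + PySem.Str.len x + 1) (List.getLast?_concat)]
    rw [List.length_cons, List.range_succ_eq_map]
    simp only [List.map_cons, List.map_map, List.append_assoc, List.singleton_append]
    congr 2
    · unfold prS pvCost
      simp
      ring
    · apply List.map_congr_left
      intro k _
      unfold prS pvCost
      simp only [Function.comp_apply, List.take_succ_cons, List.map_cons, List.sum_cons]
      ring

lemma pre_getD (lines : List String) (k : Nat) (hk : k ≤ lines.length) :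
    (pvPreFold lines).getD k 0 = prS lines k := by
  unfold pvPreFold
  rw [foldl_pre lines [0] 0 rfl]
  cases k with
  | zero => simp [prS]
  | succ k' =>
    have hk' : k' < lines.length := by omega
    rw [List.singleton_append, List.getD_cons_succ]
    rw [List.getD_eq_getElem _ _ (by simpa using hk')]
    simp

lemma prS_succ (lines : List String) (j : Nat) (h : j < lines.length) :
    prS lines (j + 1) = prS lines j + pvCost lines[j] := by
  unfold prS
  rw [List.take_add_one, List.getElem?_eq_getElem h, List.map_append, List.sum_append]
  simp

lemma inner_spec (lines : List String) (i : Nat) : ∀ (m j : Nat), lines.length - j ≤ m → i < j → j ≤ lines.length →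
    pvChunksInner (pvPreFold lines) lines.length i j ≤ lines.length ∧
    takeG (prS lines j - prS lines i) (lines.drop j)
      = ((lines.drop j).take (pvChunksInner (pvPreFold lines) lines.length i j - j),
         lines.drop (pvChunksInner (pvPreFold lines) lines.length i j)) := by
  intro m
  induction m with
  | zero =>
    intro j hm hij hjn
    have hj : j = lines.length := by omega
    subst hj
    rw [pvChunksInner, dif_neg (by rintro ⟨h1, -⟩; omega)]
    refine ⟨le_refl _, ?_⟩
    simp [takeG, List.drop_length]
  | succ m ih =>
    intro j hm hij hjn
    by_cases h : j < lines.length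
    · have hd : lines.drop j = lines[j] :: lines.drop (j + 1) := List.drop_eq_getElem_cons h
      rw [pvChunksInner]
      have hpre1 : (pvPreFold lines).getD (j + 1) 0 = prS lines (j + 1) := pre_getD _ _ (by omega)
      have hprei : (pvPreFold lines).getD i 0 = prS lines i := pre_getD _ _ (by omega)
      have hcost : prS lines (j + 1) = prS lines j + pvCost lines[j] := prS_succ lines j h
      by_cases hc : prS lines (j + 1) - prS lines i ≤ 3500
      · rw [dif_pos ⟨h, by rw [hpre1, hprei]; exact hc⟩]
        obtain ⟨h1, h2⟩ := ih (j + 1) (by omega) (by omega) (by omega)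
        refine ⟨h1, ?_⟩
        rw [hd, takeG, if_pos (by omega)]
        have hacc : prS lines j - prS lines i + pvCost lines[j] = prS lines (j + 1) - prS lines i := by
          omega
        rw [hacc, h2]
        have hk1 : j + 1 ≤ pvChunksInner (pvPreFold lines) lines.length i (j + 1) :=
          pvChunksInner_ge _ _ _ _
        have hsub : pvChunksInner (pvPreFold lines) lines.length i (j + 1) - j
            = (pvChunksInner (pvPreFold lines) lines.length i (j + 1) - (j + 1)) + 1 := by omega
        rw [hsub, List.take_succ_cons]
      · rw [dif_neg (by rintro ⟨-, hcc⟩; rw [hpre1, hprei] at hcc; exact hc hcc)]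
        refine ⟨by omega, ?_⟩
        rw [hd, takeG, if_neg (by omega), Nat.sub_self]
        rw [← hd]
        simp
    · have hj : j = lines.length := by omega
      subst hj
      rw [pvChunksInner, dif_neg (by rintro ⟨h1, -⟩; omega)]
      refine ⟨le_refl _, ?_⟩
      simp [takeG, List.drop_length]

lemma outer_spec (lines : List String) : ∀ (m i : Nat), lines.length - i ≤ m →
    pvChunksOuter lines (pvPreFold lines) lines.length i = gSpec (lines.drop i) := by
  intro m
  induction m with
  | zero =>
    intro i hm
    rw [pvChunksOuter, dif_neg (by omega), List.drop_eq_nil_of_le (by omega)]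
    simp [gSpec]
  | succ m ih =>
    intro i hm
    by_cases h : i < lines.length
    · rw [pvChunksOuter, dif_pos h]
      obtain ⟨hkn, heq⟩ :=
        inner_spec lines i (lines.length - (i + 1)) (i + 1) (by omega) (by omega) (by omega)
      set k := pvChunksInner (pvPreFold lines) lines.length i (i + 1) with hk
      have hk1 : i + 1 ≤ k := pvChunksInner_ge _ _ _ _
      have hd : lines.drop i = lines[i] :: lines.drop (i + 1) := List.drop_eq_getElem_cons h
      have hcost : prS lines (i + 1) - prS lines i = pvCost lines[i] := by
        have := prS_succ lines i h; omega
      rw [hcost] at heq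
      rw [hd, gSpec, heq, PySem.List.slice_natCast]
      rw [hd, show k - i = (k - (i + 1)) + 1 from by omega, List.take_succ_cons]
      rw [ih k (by omega)]
    · rw [pvChunksOuter, dif_neg h, List.drop_eq_nil_of_le (by omega)]
      simp [gSpec]

lemma chunks_eq (t : String) :
    pvChunks t = if PySem.Str.len t ≤ 3500 then [t] else pvSplitMarkdown t 3500 := by
  unfold pvChunks
  by_cases h : PySem.Str.len t ≤ 3500
  · rw [if_pos h, if_pos h]
  · rw [if_neg h, if_neg h, splitMarkdown_eq]
    have ho := outer_spec ((PySem.Str.split? t "\n").getD [])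
      ((PySem.Str.split? t "\n").getD []).length 0 (by omega)
    rw [List.drop_zero] at ho
    exact ho

-- ---- assembling the element lists ----
def pvGroupOf (sec : String) : Option (List (List (String × String))) :=
  if PySem.Str.strip sec = "" then none
  else some ((if PySem.Str.len (PySem.Str.strip sec) ≤ 3500 then [PySem.Str.strip sec]
              else pvSplitMarkdown (PySem.Str.strip sec) 3500).map pvMd)

def pvJoin : List (List (List (String × String))) → List (List (String × String))
  | [] => []
  | g :: rest => g ++ (if pvJoin rest ≠ [] then pvHr :: pvJoin rest else pvJoin rest)

lemma pv_foldA (l : List String) (acc : List (List (String × String))) :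
    l.foldl (fun elems sec =>
      if PySem.Str.strip sec = "" then elems
      else if PySem.Str.len (PySem.Str.strip sec) ≤ 3500 then
        (elems ++ [pvMd (PySem.Str.strip sec)]) ++ [pvHr]
      else
        (elems ++ (pvSplitMarkdown (PySem.Str.strip sec) 3500).map pvMd) ++ [pvHr]) acc
    = acc ++ ((l.filterMap pvGroupOf).map (fun g => g ++ [pvHr])).flatten := by
  induction l generalizing acc with
  | nil => simp
  | cons sec t ih =>
    simp only [List.foldl_cons, List.filterMap_cons]
    by_cases h1 : PySem.Str.strip sec = ""
    · have hg : pvGroupOf sec = none := by unfold pvGroupOf; rw [if_pos h1]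
      rw [if_pos h1, hg]
      exact ih acc
    · by_cases h2 : PySem.Str.len (PySem.Str.strip sec) ≤ 3500
      · have hg : pvGroupOf sec = some [pvMd (PySem.Str.strip sec)] := by
          unfold pvGroupOf; rw [if_neg h1, if_pos h2]; rfl
        rw [if_neg h1, if_pos h2, hg, ih]
        simp [List.append_assoc]
      · have hg : pvGroupOf sec
            = some ((pvSplitMarkdown (PySem.Str.strip sec) 3500).map pvMd) := by
          unfold pvGroupOf; rw [if_neg h1, if_neg h2]
        rw [if_neg h1, if_neg h2, hg, ih]
        simp [List.append_assoc]

lemma render_eq (sections : List String) :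
    pvRenderSections sections = pvJoin (sections.filterMap pvGroupOf) := by
  induction sections with
  | nil => rfl
  | cons sec rest ih =>
    simp only [pvRenderSections]
    by_cases h1 : PySem.Str.strip sec = ""
    · have hg : pvGroupOf sec = none := by unfold pvGroupOf; rw [if_pos h1]
      simp only [List.filterMap_cons, hg]
      rw [if_pos h1, ih]
    · have hg : pvGroupOf sec = some ((if PySem.Str.len (PySem.Str.strip sec) ≤ 3500 then
          [PySem.Str.strip sec] else pvSplitMarkdown (PySem.Str.strip sec) 3500).map pvMd) := by
        unfold pvGroupOf; rw [if_neg h1]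
      simp only [List.filterMap_cons, hg]
      rw [if_neg h1, pvJoin, ih, chunks_eq]

lemma pvJoin_flatten (gs : List (List (List (String × String)))) (h : ∀ g ∈ gs, g ≠ []) (hgs : gs ≠ []) :
    (gs.map (fun g => g ++ [pvHr])).flatten = pvJoin gs ++ [pvHr] := by
  induction gs with
  | nil => cases hgs rfl
  | cons g rest ih =>
    cases rest with
    | nil => simp [pvJoin]
    | cons g2 rest2 =>
      have hr : pvJoin (g2 :: rest2) ≠ [] := by
        rw [pvJoin]
        have hg2 : g2 ≠ [] := h g2 (by simp)
        simp [hg2]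
      rw [List.map_cons, List.flatten_cons, ih (fun x hx => h x (by simp [hx])) (by simp)]
      conv_rhs => rw [pvJoin]
      rw [if_pos hr]
      simp

lemma pop_join (gs : List (List (List (String × String)))) (h : ∀ g ∈ gs, g ≠ []) :
    (match ((gs.map (fun g => g ++ [pvHr])).flatten).getLast? with
      | some e => if PySem.Dict.get? (PySem.Dict.mk e) "tag" = some "hr" then
          ((gs.map (fun g => g ++ [pvHr])).flatten).dropLast else (gs.map (fun g => g ++ [pvHr])).flatten
      | none => (gs.map (fun g => g ++ [pvHr])).flatten)
    = pvJoin gs := by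
  cases gs with
  | nil => rfl
  | cons g rest =>
    rw [pvJoin_flatten _ h (by simp), List.getLast?_concat]
    have htag : PySem.Dict.get? (PySem.Dict.mk pvHr) "tag" = some "hr" := by decide
    simp [htag]

lemma group_ne_nil (sec : String) (g : List (List (String × String)))
    (h : pvGroupOf sec = some g) : g ≠ [] := by
  have hsp : pvSplitMarkdown (PySem.Str.strip sec) 3500 ≠ [] := by
    rw [splitMarkdown_eq]
    have hne := pv_split_getD_ne_nil (PySem.Str.strip sec) "\n" (by decide)
    cases hl : (PySem.Str.split? (PySem.Str.strip sec) "\n").getD [] with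
    | nil => exact absurd hl hne
    | cons x xs => simp [gSpec]
  unfold pvGroupOf at h
  split_ifs at h with h1 h2
  · rw [← Option.some_inj.mp h]
    simp
  · rw [← Option.some_inj.mp h]
    simpa using hsp

-- ===== VERDICT (by name: the statement is the Claim_ definition above) =====
theorem build_card_elements_py_spec : Claim_equal_build_card_elements_py := by
  intro mb _
  unfold Spec_build_card_elements_py build_card_elements_py build_card_elements_py_alt
  simp only [pv_foldA, List.nil_append, render_eq]
  have hne : ∀ g ∈ ((PySem.Str.split? mb "\n---\n").getD []).filterMap pvGroupOf, g ≠ [] := by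
    intro g hg
    obtain ⟨sec, -, hsec⟩ := List.mem_filterMap.mp hg
    exact group_ne_nil sec g hsec
  rw [pop_join _ hne]
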